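-- pv_equiv track=rewrite | github.com/thorntizzle/player-wiki-app | player_wiki/character_campaign_options.py | collect_campaign_option_proficiency_grants
-- ===== SOURCE A (Python) =====
-- from typing import Any
--
-- def collect_campaign_option_proficiency_grants(option_payloads: list[Any]) -> dict[str, list[str]]:
--     grants = {
--         "armor": [],
--         "weapons": [],
--         "tools": [],
--         "languages": [],
--         "skills": [],
--     }
--     seen_by_key = {key: set() for key in grants}
--     for payload in list(option_payloads or []):
--         option = dict(payload or {}) if isinstance(payload, dict) else {}
--         proficiency_payload = dict(option.get("proficiencies") or {})
--         for key in grants: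
--             for value in _normalize_string_list(proficiency_payload.get(key)):
--                 normalized_value = value.casefold()
--                 if normalized_value in seen_by_key[key]:
--                     continue
--                 seen_by_key[key].add(normalized_value)
--                 grants[key].append(value)
--     return grants
--
-- def _normalize_string_list(value: Any) -> list[str]:
--     if isinstance(value, str):
--         raw_items = value.replace("\r", "").replace("\n", ",").split(",")
--     elif isinstance(value, list):
--         raw_items = value
--     else:
--         return []
--
--     values: list[str] = []
--     seen: set[str] = set()
--     for raw_item in raw_items:
--         if isinstance(raw_item, (dict, list, tuple, set)):
--             continue
--         clean_item = str(raw_item or "").strip()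
--         normalized_item = clean_item.casefold()
--         if not clean_item or normalized_item in seen:
--             continue
--         seen.add(normalized_item)
--         values.append(clean_item)
--     return values
-- ===== SOURCE B (Python) =====
-- from typing import Any
--
--
-- def collect_campaign_option_proficiency_grants(option_payloads: list[Any]) -> dict[str, list[str]]:
--     keys = ("armor", "weapons", "tools", "languages", "skills")
--     # Phase 1: collect every cleaned candidate string per key, in order, without deduplicating.
--     collected = {key: [] for key in keys}
--     for payload in list(option_payloads or []):
--         option = dict(payload or {}) if isinstance(payload, dict) else {}
--         proficiency_payload = dict(option.get("proficiencies") or {})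
--         for key in keys:
--             collected[key].extend(_candidate_strings(proficiency_payload.get(key)))
--     # Phase 2: deduplicate each flat list once, first occurrence wins by casefold.
--     return {key: _dedupe_casefold(items) for key, items in collected.items()}
--
--
-- def _candidate_strings(value: Any) -> list[str]:
--     if isinstance(value, str):
--         raw_items = value.replace("\r", "").replace("\n", ",").split(",")
--     elif isinstance(value, list):
--         raw_items = value
--     else:
--         return []
--     out = []
--     for raw_item in raw_items:
--         if isinstance(raw_item, (dict, list, tuple, set)):
--             continue
--         clean_item = str(raw_item or "").strip()
--         if clean_item:
--             out.append(clean_item)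
--     return out
--
--
-- def _dedupe_casefold(items: list) -> list:
--     seen = set()
--     out = []
--     for item in items:
--         normalized = item.casefold()
--         if normalized not in seen:
--             seen.add(normalized)
--             out.append(item)
--     return out
-- ===== Notes on version B (the rewrite author's own statement) =====
-- stated objective: simpler
-- what changed: B replaces A's interleaved double deduplication (a per-payload dedup inside _normalize_string_list plus a running seen-set dedup while appending) with two plain phases: collect all cleaned candidate strings per key into flat lists, then deduplicate each list once by casefold keeping the first occurrence.
import Mathlib
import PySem

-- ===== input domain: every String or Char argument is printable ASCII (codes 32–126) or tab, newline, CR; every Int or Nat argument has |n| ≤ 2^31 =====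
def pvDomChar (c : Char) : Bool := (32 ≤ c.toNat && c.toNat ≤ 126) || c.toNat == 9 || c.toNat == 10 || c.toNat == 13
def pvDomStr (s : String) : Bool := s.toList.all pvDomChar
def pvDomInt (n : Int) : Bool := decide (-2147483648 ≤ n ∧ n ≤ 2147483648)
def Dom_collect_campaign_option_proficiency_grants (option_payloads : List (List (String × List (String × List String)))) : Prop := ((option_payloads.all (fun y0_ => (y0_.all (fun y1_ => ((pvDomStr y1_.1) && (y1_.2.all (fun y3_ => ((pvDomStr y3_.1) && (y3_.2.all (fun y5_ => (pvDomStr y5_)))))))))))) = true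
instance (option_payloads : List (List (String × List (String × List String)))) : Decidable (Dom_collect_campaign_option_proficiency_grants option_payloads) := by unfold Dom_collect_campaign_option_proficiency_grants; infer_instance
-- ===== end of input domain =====

-- B replaces A's interleaved double deduplication (per-payload dedup inside _normalize_string_list plus a
-- running seen-set dedup while appending) with two plain phases: collect all cleaned candidates per key,
-- then dedupe each flat list once by casefold keeping the first occurrence (objective: simpler).
-- casefold is ported as PySem.Str.lower, exact on the ASCII input domain Dom_.

-- ===== PORT A =====
-- dict(pairs): both Pythons build dicts from pair lists this way (later entries overwrite in place)
def pvDict {α : Type} (pairs : List (String × α)) : PySem.Dict String α :=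
  pairs.foldl (fun d p => d.insert p.1 p.2) PySem.Dict.empty

-- the list branch of _normalize_string_list (under the typed domain the value is None or a list of strings;
-- the isinstance(str)/container-skip branches are unreachable); str(raw_item or "") = raw_item for strings
def pvNormLoopA : List String → PySem.Set String → List String → List String
  | [], _, values => values
  | raw_item :: rest, seen, values =>
    let clean_item := PySem.Str.strip raw_item
    let normalized_item := PySem.Str.lower clean_item
    if clean_item = "" ∨ seen.contains normalized_item then pvNormLoopA rest seen values
    else pvNormLoopA rest (seen.add normalized_item) (values ++ [clean_item])

def pvNormalizeA (value : Option (List String)) : List String :=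
  match value with
  | some raw_items => pvNormLoopA raw_items PySem.Set.empty []
  | none => []

-- body of A's innermost loop ('for value in _normalize_string_list(...)'): state = (grants, seen_by_key)
def pvStepValA (key : String)
    (st : PySem.Dict String (List String) × PySem.Dict String (PySem.Set String)) (value : String) :
    PySem.Dict String (List String) × PySem.Dict String (PySem.Set String) :=
  let normalized_value := PySem.Str.lower value
  if (st.2.getD key PySem.Set.empty).contains normalized_value then st
  else (st.1.modify key [] (fun g => g ++ [value]),
        st.2.modify key PySem.Set.empty (fun s => s.add normalized_value))

def pvStepKeyA (prof : PySem.Dict String (List String))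
    (st : PySem.Dict String (List String) × PySem.Dict String (PySem.Set String)) (key : String) :
    PySem.Dict String (List String) × PySem.Dict String (PySem.Set String) :=
  (pvNormalizeA (prof.get? key)).foldl (pvStepValA key) st

-- option.get("proficiencies") or {} : the falsy cases (None, empty dict) both give the empty dict
def pvProf (payload : List (String × List (String × List String))) : PySem.Dict String (List String) :=
  pvDict (((pvDict payload).get? "proficiencies").getD [])

def pvStepPayloadA
    (st : PySem.Dict String (List String) × PySem.Dict String (PySem.Set String))
    (payload : List (String × List (String × List String))) :
    PySem.Dict String (List String) × PySem.Dict String (PySem.Set String) :=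
  (st.1.keys).foldl (pvStepKeyA (pvProf payload)) st

def collect_campaign_option_proficiency_grants (option_payloads : List (List (String × List (String × List String)))) : List (String × List String) :=
  let grants : PySem.Dict String (List String) :=
    PySem.Dict.ofList [("armor", []), ("weapons", []), ("tools", []), ("languages", []), ("skills", [])]
  let seen_by_key : PySem.Dict String (PySem.Set String) :=
    grants.keys.foldl (fun d k => d.insert k PySem.Set.empty) PySem.Dict.empty
  (option_payloads.foldl pvStepPayloadA (grants, seen_by_key)).1.items

-- ===== PORT B =====
-- phase 1 helper: cleaned candidate strings of one value, no deduplication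
def pvCandidatesB (value : Option (List String)) : List String :=
  match value with
  | some raw_items =>
      raw_items.foldl (fun out raw_item =>
        let clean_item := PySem.Str.strip raw_item
        if clean_item = "" then out else out ++ [clean_item]) []
  | none => []

-- phase 2 helper: dedupe once, first occurrence wins by casefold
def pvDedupStepB (st : PySem.Set String × List String) (item : String) : PySem.Set String × List String :=
  let normalized := PySem.Str.lower item
  if st.1.contains normalized then st else (st.1.add normalized, st.2 ++ [item])

def pvDedupeB (items : List String) : List String :=
  (items.foldl pvDedupStepB (PySem.Set.empty, [])).2

def pvKeysB : List String := ["armor", "weapons", "tools", "languages", "skills"]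

def pvStepPayloadB (collected : PySem.Dict String (List String))
    (payload : List (String × List (String × List String))) : PySem.Dict String (List String) :=
  pvKeysB.foldl (fun c key => c.modify key [] (fun xs => xs ++ pvCandidatesB ((pvProf payload).get? key))) collected

def collect_campaign_option_proficiency_grants_alt (option_payloads : List (List (String × List (String × List String)))) : List (String × List String) :=
  let collected0 : PySem.Dict String (List String) :=
    pvKeysB.foldl (fun d k => d.insert k []) PySem.Dict.empty
  let collected := option_payloads.foldl pvStepPayloadB collected0
  collected.items.map (fun p => (p.1, pvDedupeB p.2))

-- ===== PRECONDITION & SPEC =====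
def Spec_collect_campaign_option_proficiency_grants (option_payloads : List (List (String × List (String × List String)))) (out : List (String × List String)) : Prop := out = collect_campaign_option_proficiency_grants_alt option_payloads
instance (option_payloads : List (List (String × List (String × List String)))) (out : List (String × List String)) : Decidable (Spec_collect_campaign_option_proficiency_grants option_payloads out) := by unfold Spec_collect_campaign_option_proficiency_grants; infer_instance

-- ===== CLAIM (what is proved, stated in full; the proofs are below) =====
def Claim_equal_collect_campaign_option_proficiency_grants : Prop := ∀ (option_payloads : List (List (String × List (String × List String)))), Dom_collect_campaign_option_proficiency_grants option_payloads → Spec_collect_campaign_option_proficiency_grants option_payloads (collect_campaign_option_proficiency_grants option_payloads)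

-- ===== LEMMAS AND PROOFS =====

-- the fixed 5-key dict shape both programs' dict states always have
def pvMkD {α : Type} (a b c d e : α) : PySem.Dict String α :=
  PySem.Dict.mk [("armor", a), ("weapons", b), ("tools", c), ("languages", d), ("skills", e)]

theorem pvMkD_keys {α : Type} (a b c d e : α) : (pvMkD a b c d e).keys = pvKeysB := rfl
theorem pvMkD_nodup {α : Type} (a b c d e : α) : (pvMkD a b c d e).keys.Nodup := by
  rw [pvMkD_keys]; decide

-- cons-form of pvCandidatesB's inner list
def pvCandL : List String → List String
  | [] => []
  | r :: rest =>
    if PySem.Str.strip r = "" then pvCandL rest else PySem.Str.strip r :: pvCandL rest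

-- cons-form of local (per-payload) dedup with an explicit seen set
def pvDD : PySem.Set String → List String → List String
  | _, [] => []
  | T, c :: cs =>
    if T.contains (PySem.Str.lower c) then pvDD T cs
    else c :: pvDD (T.add (PySem.Str.lower c)) cs

theorem pvCandidatesB_foldl (raw : List String) (out : List String) :
    raw.foldl (fun out raw_item =>
      let clean_item := PySem.Str.strip raw_item
      if clean_item = "" then out else out ++ [clean_item]) out = out ++ pvCandL raw := by
  induction raw generalizing out with
  | nil => simp [pvCandL]
  | cons r rest ih =>
    simp only [List.foldl_cons, pvCandL]
    split_ifs with h <;> simp [ih]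

theorem pvCandidatesB_some (raw : List String) :
    pvCandidatesB (some raw) = pvCandL raw := by
  simpa using pvCandidatesB_foldl raw []

theorem pv_contains_iff {T : PySem.Set String} {x : String} :
    T.contains x = true ↔ x ∈ T := by
  simp [PySem.Set.contains]

theorem pvNormLoopA_eq (raw : List String) (T : PySem.Set String) (acc : List String) :
    pvNormLoopA raw T acc = acc ++ pvDD T (pvCandL raw) := by
  induction raw generalizing T acc with
  | nil => simp [pvNormLoopA, pvCandL, pvDD]
  | cons r rest ih =>
    simp only [pvNormLoopA, pvCandL]
    by_cases h0 : PySem.Str.strip r = ""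
    · rw [if_pos (Or.inl h0), if_pos h0, ih]
    · by_cases h1 : T.contains (PySem.Str.lower (PySem.Str.strip r)) = true
      · have hm : PySem.Str.lower (PySem.Str.strip r) ∈ T := pv_contains_iff.1 h1
        rw [if_pos (Or.inr h1), if_neg h0, ih,
          show pvDD T (PySem.Str.strip r :: pvCandL rest) = pvDD T (pvCandL rest) from by
            simp [pvDD, hm]]
      · have hm : PySem.Str.lower (PySem.Str.strip r) ∉ T := fun h => h1 (pv_contains_iff.2 h)
        rw [if_neg (by simp [h0]; exact hm), if_neg h0, ih,
          show pvDD T (PySem.Str.strip r :: pvCandL rest)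
              = PySem.Str.strip r :: pvDD (T.add (PySem.Str.lower (PySem.Str.strip r))) (pvCandL rest) from by
            simp [pvDD, hm]]
        simp

-- absorbing the local dedup into a global dedup fold: if every seen-set entry of the local pass is
-- already in the global seen set, the locally deduped list folds to the same global state
theorem pvDD_absorb (cs : List String) (T : PySem.Set String)
    (st : PySem.Set String × List String) (hTS : ∀ x ∈ T, x ∈ st.1) :
    List.foldl pvDedupStepB st (pvDD T cs) = List.foldl pvDedupStepB st cs := by
  induction cs generalizing T st with
  | nil => rfl
  | cons c cs ih =>
    simp only [pvDD]
    by_cases hT : T.contains (PySem.Str.lower c) = true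
    · have hS : st.1.contains (PySem.Str.lower c) = true :=
        pv_contains_iff.2 (hTS _ (pv_contains_iff.1 hT))
      have hmS : PySem.Str.lower c ∈ st.1 := pv_contains_iff.1 hS
      rw [if_pos hT, ih T st hTS, List.foldl_cons,
        show pvDedupStepB st c = st from by simp [pvDedupStepB, hmS]]
    · rw [if_neg hT, List.foldl_cons, List.foldl_cons]
      apply ih
      intro x hx
      rcases (PySem.Set.mem_add T (PySem.Str.lower c) x).1 hx with h | h
      · have hxS := hTS _ h
        simp only [pvDedupStepB]
        split_ifs with hc
        · exact hxS
        · exact (PySem.Set.mem_add _ _ _).2 (Or.inl hxS)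
      · subst h
        simp only [pvDedupStepB]
        split_ifs with hc
        · exact pv_contains_iff.1 hc
        · exact (PySem.Set.mem_add _ _ _).2 (Or.inr rfl)

theorem pv_fold_norm_eq_cand (o : Option (List String)) (st : PySem.Set String × List String) :
    List.foldl pvDedupStepB st (pvNormalizeA o) = List.foldl pvDedupStepB st (pvCandidatesB o) := by
  cases o with
  | none => rfl
  | some raw =>
    have h1 : pvNormalizeA (some raw) = pvDD PySem.Set.empty (pvCandL raw) := by
      simpa using pvNormLoopA_eq raw PySem.Set.empty []
    rw [h1, pvCandidatesB_some]
    exact pvDD_absorb _ _ _ (by intro x hx; simp [PySem.Set.empty] at hx)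

-- Dict.modify is insert of the modified value (definitional)
theorem pv_modify_eq_insert {α : Type} (d : PySem.Dict String α) (k : String) (z : α) (f : α → α) :
    d.modify k z f = d.insert k (f (d.getD k z)) := rfl

theorem pv_insert_getD_self {α : Type} (d : PySem.Dict String α) (k : String) (z : α)
    (hnd : d.keys.Nodup) (hk : d.contains k = true) : d.insert k (d.getD k z) = d := by
  apply PySem.Dict.ext
  rw [PySem.Dict.items_insert_of_contains d _ hk]
  conv_rhs => rw [← List.map_id d.items]
  apply List.map_congr_left
  intro p hp
  by_cases h : p.1 = k
  · subst h
    have hmem : (p.1, p.2) ∈ d.items := hp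
    have hg := PySem.Dict.getD_of_mem_items d hmem hnd z
    simp [hg]
  · simp [h]

-- A's inner value loop only touches the entry at its key
theorem pvStepValA_localize (k : String) (vals : List String)
    (G : PySem.Dict String (List String)) (S : PySem.Dict String (PySem.Set String))
    (hGnd : G.keys.Nodup) (hSnd : S.keys.Nodup)
    (hGk : G.contains k = true) (hSk : S.contains k = true) :
    vals.foldl (pvStepValA k) (G, S) =
      (G.insert k (vals.foldl pvDedupStepB (S.getD k PySem.Set.empty, G.getD k [])).2,
       S.insert k (vals.foldl pvDedupStepB (S.getD k PySem.Set.empty, G.getD k [])).1) := by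
  induction vals generalizing G S with
  | nil =>
    simp only [List.foldl_nil]
    rw [pv_insert_getD_self _ _ _ hGnd hGk, pv_insert_getD_self _ _ _ hSnd hSk]
  | cons v vs ih =>
    simp only [List.foldl_cons]
    by_cases hc : (S.getD k PySem.Set.empty).contains (PySem.Str.lower v) = true
    · have hcm : PySem.Str.lower v ∈ S.getD k ([] : PySem.Set String) := pv_contains_iff.1 hc
      have h1 : pvStepValA k (G, S) v = (G, S) := by simp [pvStepValA, hcm]
      have h2 : pvDedupStepB (S.getD k PySem.Set.empty, G.getD k []) v
          = (S.getD k PySem.Set.empty, G.getD k []) := by simp [pvDedupStepB, hcm]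
      rw [h1, h2, ih G S hGnd hSnd hGk hSk]
    · have hcm : PySem.Str.lower v ∉ S.getD k ([] : PySem.Set String) := fun h => hc (pv_contains_iff.2 h)
      have h1 : pvStepValA k (G, S) v =
          (G.insert k (G.getD k [] ++ [v]),
           S.insert k ((S.getD k PySem.Set.empty).add (PySem.Str.lower v))) := by
        simp [pvStepValA, hcm, pv_modify_eq_insert]
      have h2 : pvDedupStepB (S.getD k PySem.Set.empty, G.getD k []) v
          = ((S.getD k PySem.Set.empty).add (PySem.Str.lower v), G.getD k [] ++ [v]) := by
        simp [pvDedupStepB, hcm]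
      rw [h1, h2]
      rw [ih _ _ (by rw [PySem.Dict.keys_insert_of_contains _ _ hGk]; exact hGnd)
            (by rw [PySem.Dict.keys_insert_of_contains _ _ hSk]; exact hSnd)
            (by simp) (by simp)]
      simp [PySem.Dict.getD_insert_self, PySem.Dict.insert_insert_self]

-- pvMkD shape lemmas (all definitional: the keys are literals)
theorem pvMkD_insert_armor {α : Type} (a b c d e x : α) : (pvMkD a b c d e).insert "armor" x = pvMkD x b c d e := rfl
theorem pvMkD_insert_weapons {α : Type} (a b c d e x : α) : (pvMkD a b c d e).insert "weapons" x = pvMkD a x c d e := rfl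
theorem pvMkD_insert_tools {α : Type} (a b c d e x : α) : (pvMkD a b c d e).insert "tools" x = pvMkD a b x d e := rfl
theorem pvMkD_insert_languages {α : Type} (a b c d e x : α) : (pvMkD a b c d e).insert "languages" x = pvMkD a b c x e := rfl
theorem pvMkD_insert_skills {α : Type} (a b c d e x : α) : (pvMkD a b c d e).insert "skills" x = pvMkD a b c d x := rfl
theorem pvMkD_getD_armor {α : Type} (a b c d e z : α) : (pvMkD a b c d e).getD "armor" z = a := rfl
theorem pvMkD_getD_weapons {α : Type} (a b c d e z : α) : (pvMkD a b c d e).getD "weapons" z = b := rfl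
theorem pvMkD_getD_tools {α : Type} (a b c d e z : α) : (pvMkD a b c d e).getD "tools" z = c := rfl
theorem pvMkD_getD_languages {α : Type} (a b c d e z : α) : (pvMkD a b c d e).getD "languages" z = d := rfl
theorem pvMkD_getD_skills {α : Type} (a b c d e z : α) : (pvMkD a b c d e).getD "skills" z = e := rfl
theorem pvMkD_contains {α : Type} (a b c d e : α) (k : String) (hk : k ∈ pvKeysB) :
    (pvMkD a b c d e).contains k = true := by
  fin_cases hk <;> rfl

-- per-payload step of A on the 5-key shape
theorem pvStepPayloadA_shape (payload : List (String × List (String × List String)))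
    (a b c d e : List String) (p q r s t : PySem.Set String) :
    pvStepPayloadA (pvMkD a b c d e, pvMkD p q r s t) payload =
      (pvMkD (List.foldl pvDedupStepB (p, a) (pvNormalizeA ((pvProf payload).get? "armor"))).2
             (List.foldl pvDedupStepB (q, b) (pvNormalizeA ((pvProf payload).get? "weapons"))).2
             (List.foldl pvDedupStepB (r, c) (pvNormalizeA ((pvProf payload).get? "tools"))).2
             (List.foldl pvDedupStepB (s, d) (pvNormalizeA ((pvProf payload).get? "languages"))).2
             (List.foldl pvDedupStepB (t, e) (pvNormalizeA ((pvProf payload).get? "skills"))).2,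
       pvMkD (List.foldl pvDedupStepB (p, a) (pvNormalizeA ((pvProf payload).get? "armor"))).1
             (List.foldl pvDedupStepB (q, b) (pvNormalizeA ((pvProf payload).get? "weapons"))).1
             (List.foldl pvDedupStepB (r, c) (pvNormalizeA ((pvProf payload).get? "tools"))).1
             (List.foldl pvDedupStepB (s, d) (pvNormalizeA ((pvProf payload).get? "languages"))).1
             (List.foldl pvDedupStepB (t, e) (pvNormalizeA ((pvProf payload).get? "skills"))).1) := by
  show (pvKeysB.foldl (pvStepKeyA (pvProf payload)) (pvMkD a b c d e, pvMkD p q r s t)) = _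
  simp only [pvKeysB, List.foldl_cons, List.foldl_nil, pvStepKeyA]
  rw [pvStepValA_localize _ _ _ _ (pvMkD_nodup _ _ _ _ _) (pvMkD_nodup _ _ _ _ _)
        (pvMkD_contains _ _ _ _ _ _ (by decide)) (pvMkD_contains _ _ _ _ _ _ (by decide))]
  simp only [pvMkD_insert_armor, pvMkD_getD_armor]
  rw [pvStepValA_localize _ _ _ _ (pvMkD_nodup _ _ _ _ _) (pvMkD_nodup _ _ _ _ _)
        (pvMkD_contains _ _ _ _ _ _ (by decide)) (pvMkD_contains _ _ _ _ _ _ (by decide))]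
  simp only [pvMkD_insert_weapons, pvMkD_getD_weapons]
  rw [pvStepValA_localize _ _ _ _ (pvMkD_nodup _ _ _ _ _) (pvMkD_nodup _ _ _ _ _)
        (pvMkD_contains _ _ _ _ _ _ (by decide)) (pvMkD_contains _ _ _ _ _ _ (by decide))]
  simp only [pvMkD_insert_tools, pvMkD_getD_tools]
  rw [pvStepValA_localize _ _ _ _ (pvMkD_nodup _ _ _ _ _) (pvMkD_nodup _ _ _ _ _)
        (pvMkD_contains _ _ _ _ _ _ (by decide)) (pvMkD_contains _ _ _ _ _ _ (by decide))]
  simp only [pvMkD_insert_languages, pvMkD_getD_languages]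
  rw [pvStepValA_localize _ _ _ _ (pvMkD_nodup _ _ _ _ _) (pvMkD_nodup _ _ _ _ _)
        (pvMkD_contains _ _ _ _ _ _ (by decide)) (pvMkD_contains _ _ _ _ _ _ (by decide))]
  simp only [pvMkD_insert_skills, pvMkD_getD_skills]

-- per-key accumulation of A over the payload list
def pvPK (k : String) (st : PySem.Set String × List String)
    (ps : List (List (String × List (String × List String)))) : PySem.Set String × List String :=
  ps.foldl (fun st payload => List.foldl pvDedupStepB st (pvNormalizeA ((pvProf payload).get? k))) st

theorem pvFoldA_shape (ps : List (List (String × List (String × List String))))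
    (a b c d e : List String) (p q r s t : PySem.Set String) :
    ps.foldl pvStepPayloadA (pvMkD a b c d e, pvMkD p q r s t) =
      (pvMkD (pvPK "armor" (p, a) ps).2 (pvPK "weapons" (q, b) ps).2 (pvPK "tools" (r, c) ps).2
             (pvPK "languages" (s, d) ps).2 (pvPK "skills" (t, e) ps).2,
       pvMkD (pvPK "armor" (p, a) ps).1 (pvPK "weapons" (q, b) ps).1 (pvPK "tools" (r, c) ps).1
             (pvPK "languages" (s, d) ps).1 (pvPK "skills" (t, e) ps).1) := by
  induction ps generalizing a b c d e p q r s t with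
  | nil => rfl
  | cons payload ps ih =>
    rw [List.foldl_cons, pvStepPayloadA_shape, ih]
    rfl

-- B's flat per-key collection over the payload list
def pvFL (k : String) (acc : List String)
    (ps : List (List (String × List (String × List String)))) : List String :=
  ps.foldl (fun acc payload => acc ++ pvCandidatesB ((pvProf payload).get? k)) acc

theorem pvFoldB_shape (ps : List (List (String × List (String × List String))))
    (a b c d e : List String) :
    ps.foldl pvStepPayloadB (pvMkD a b c d e) =
      pvMkD (pvFL "armor" a ps) (pvFL "weapons" b ps) (pvFL "tools" c ps)
            (pvFL "languages" d ps) (pvFL "skills" e ps) := by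
  induction ps generalizing a b c d e with
  | nil => rfl
  | cons payload ps ih =>
    rw [List.foldl_cons]
    have hstep : pvStepPayloadB (pvMkD a b c d e) payload =
        pvMkD (a ++ pvCandidatesB ((pvProf payload).get? "armor"))
              (b ++ pvCandidatesB ((pvProf payload).get? "weapons"))
              (c ++ pvCandidatesB ((pvProf payload).get? "tools"))
              (d ++ pvCandidatesB ((pvProf payload).get? "languages"))
              (e ++ pvCandidatesB ((pvProf payload).get? "skills")) := rfl
    rw [hstep, ih]
    rfl

-- the cleaned candidates of every payload at key k, concatenated
def pvFlat (k : String) (ps : List (List (String × List (String × List String)))) : List String :=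
  (ps.map (fun payload => pvCandidatesB ((pvProf payload).get? k))).flatten

theorem pvFL_eq (k : String) (ps : List (List (String × List (String × List String)))) (acc : List String) :
    pvFL k acc ps = acc ++ pvFlat k ps := by
  induction ps generalizing acc with
  | nil => simp [pvFL, pvFlat]
  | cons payload ps ih =>
    rw [show pvFL k acc (payload :: ps)
        = pvFL k (acc ++ pvCandidatesB ((pvProf payload).get? k)) ps from rfl, ih,
      show pvFlat k (payload :: ps)
        = pvCandidatesB ((pvProf payload).get? k) ++ pvFlat k ps from by simp [pvFlat]]
    simp

theorem pvPK_eq (k : String) (ps : List (List (String × List (String × List String))))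
    (st : PySem.Set String × List String) :
    pvPK k st ps = List.foldl pvDedupStepB st (pvFlat k ps) := by
  induction ps generalizing st with
  | nil => rfl
  | cons payload ps ih =>
    rw [show pvPK k st (payload :: ps)
        = pvPK k (List.foldl pvDedupStepB st (pvNormalizeA ((pvProf payload).get? k))) ps from rfl,
      ih, pv_fold_norm_eq_cand,
      show pvFlat k (payload :: ps)
        = pvCandidatesB ((pvProf payload).get? k) ++ pvFlat k ps from by simp [pvFlat],
      List.foldl_append]

theorem pv_main (ps : List (List (String × List (String × List String)))) :
    collect_campaign_option_proficiency_grants ps = collect_campaign_option_proficiency_grants_alt ps := by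
  have hL : collect_campaign_option_proficiency_grants ps =
      (ps.foldl pvStepPayloadA (pvMkD [] [] [] [] [],
        pvMkD PySem.Set.empty PySem.Set.empty PySem.Set.empty PySem.Set.empty PySem.Set.empty)).1.items := rfl
  have hR : collect_campaign_option_proficiency_grants_alt ps =
      ((ps.foldl pvStepPayloadB (pvMkD [] [] [] [] [])).items.map (fun p => (p.1, pvDedupeB p.2))) := rfl
  rw [hL, hR, pvFoldA_shape, pvFoldB_shape]
  simp only [pvPK_eq, pvFL_eq, List.nil_append]
  rfl

-- ===== VERDICT (by name: the statement is the Claim_ definition above) =====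
theorem collect_campaign_option_proficiency_grants_spec : Claim_equal_collect_campaign_option_proficiency_grants := by
  intro ps _
  unfold Spec_collect_campaign_option_proficiency_grants
  exact pv_main ps
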